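-- pv_equiv track=rewrite | github.com/Collegiate-Edu-Nation/chatbot-util | src/chatbot_util/utils.py | create_other_answer
-- ===== SOURCE A (Python) =====
-- def create_other_answer(answers, num, index):
--     """Update other topics to be the relevant answer"""
--     answer = None
--     i = 0
--     while not answer:
--         if (index == i) or (index in set(range(num + (i * 5), num + ((i + 1) * 5)))):
--             answer = answers[i]
--         i += 1
--     index += 1
--     return answer, index
-- ===== SOURCE B (Python) =====
-- def create_other_answer(answers, num, index):
--     """Update other topics to be the relevant answer"""
--     j = (index - num) // 5
--     c = min(c for c in (index, j) if 0 <= c < len(answers) and answers[c])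
--     return answers[c], index + 1
-- ===== Notes on version B (the rewrite author's own statement) =====
-- stated objective: faster
-- what changed: Replaced the incrementing while-loop (which builds a 5-element set each iteration until the index/block condition first fires on a truthy answer) by direct arithmetic: the only loop counters that can match are index itself and (index-num)//5, so B takes the smaller valid one in O(1).
import Mathlib
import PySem

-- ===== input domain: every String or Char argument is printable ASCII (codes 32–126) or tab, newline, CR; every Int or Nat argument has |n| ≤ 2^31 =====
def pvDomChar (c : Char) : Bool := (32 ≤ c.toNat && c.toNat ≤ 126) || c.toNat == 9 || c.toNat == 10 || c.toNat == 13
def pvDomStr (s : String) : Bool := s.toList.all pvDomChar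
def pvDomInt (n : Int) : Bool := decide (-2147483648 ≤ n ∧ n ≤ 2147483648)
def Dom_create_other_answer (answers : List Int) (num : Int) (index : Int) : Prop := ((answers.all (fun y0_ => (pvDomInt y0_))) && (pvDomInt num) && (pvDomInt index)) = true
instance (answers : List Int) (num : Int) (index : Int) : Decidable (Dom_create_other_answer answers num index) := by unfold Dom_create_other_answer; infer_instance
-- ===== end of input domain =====

-- B replaces A's incrementing while-loop by direct O(1) arithmetic on the two possible matching
-- loop counters (index itself and (index-num)//5); return values agree on all of Pre_.

-- ===== PORT A =====
-- the loop guard: (index == i) or (index in set(range(num + i*5, num + (i+1)*5)))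
def coaCond (num index i : Int) : Bool :=
  decide (index = i) || (decide (num + i * 5 ≤ index) && decide (index < num + (i + 1) * 5))

-- the while-loop; fuel makes it total (outside Pre_ the Python loops forever or raises IndexError,
-- both rendered as none)
def coaLoop (answers : List Int) (num index : Int) : Nat → Int → Option Int
  | 0, _ => none
  | f + 1, i =>
    if coaCond num index i then
      match PySem.List.pyGet? answers i with
      | none => none
      | some a => if a = 0 then coaLoop answers num index f (i + 1) else some a
    else coaLoop answers num index f (i + 1)

def create_other_answer (answers : List Int) (num : Int) (index : Int) : Int × Int :=
  let fuel := (max index (PySem.Int.floordiv (index - num) 5) + 2).toNat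
  match coaLoop answers num index fuel 0 with
  | some a => (a, index + 1)
  | none => (0, index + 1)

-- ===== PORT B =====
def create_other_answer_alt (answers : List Int) (num : Int) (index : Int) : Int × Int :=
  let j := PySem.Int.floordiv (index - num) 5
  let cs := [index, j].filter (fun c =>
    decide (0 ≤ c) && decide (c < (answers.length : Int)) && ((PySem.List.pyGet? answers c).getD 0 != 0))
  match PySem.List.min? cs (fun x => x) with
  | some c => ((PySem.List.pyGet? answers c).getD 0, index + 1)
  | none => (0, index + 1)   -- B's Python raises ValueError here (outside Pre_)

-- ===== PRECONDITION & SPEC =====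
-- a candidate position holding a truthy answer
def coaValid (answers : List Int) (c : Int) : Prop :=
  0 ≤ c ∧ c < (answers.length : Int) ∧ (PySem.List.pyGet? answers c).getD 0 ≠ 0

-- Pre_: A returns normally iff position index or position (index-num)//5 is in range with a
-- nonzero answer; otherwise the Python loops forever or raises IndexError.
def Pre_create_other_answer (answers : List Int) (num : Int) (index : Int) : Prop :=
  coaValid answers index ∨ coaValid answers (PySem.Int.floordiv (index - num) 5)

instance (answers : List Int) (num : Int) (index : Int) : Decidable (Pre_create_other_answer answers num index) := by
  unfold Pre_create_other_answer coaValid; infer_instance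

def pvWitness_create_other_answer : List Int × Int × Int := ([1], 0, 0)

def Spec_create_other_answer (answers : List Int) (num : Int) (index : Int) (out : Int × Int) : Prop := out = create_other_answer_alt answers num index
instance (answers : List Int) (num : Int) (index : Int) (out : Int × Int) : Decidable (Spec_create_other_answer answers num index out) := by unfold Spec_create_other_answer; infer_instance

-- ===== CLAIM (what is proved, stated in full; the proofs are below) =====
def Claim_equal_create_other_answer : Prop := ∀ (answers : List Int) (num : Int) (index : Int), Dom_create_other_answer answers num index → Pre_create_other_answer answers num index → Spec_create_other_answer answers num index (create_other_answer answers num index)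

-- ===== LEMMAS AND PROOFS =====

-- the guard fires exactly at the two candidate counters
theorem coaCond_iff (num index k : Int) :
    coaCond num index k = true ↔ (k = index ∨ k = PySem.Int.floordiv (index - num) 5) := by
  unfold coaCond
  simp only [Bool.or_eq_true, Bool.and_eq_true, decide_eq_true_eq]
  have h5 : (0:Int) < 5 := by norm_num
  constructor
  · rintro (h | ⟨h1, h2⟩)
    · exact Or.inl h.symm
    · exact Or.inr ((PySem.Int.floordiv_eq_iff_of_pos h5).mpr (by omega)).symm
  · rintro (h | h)
    · exact Or.inl h.symm
    · have := (PySem.Int.floordiv_eq_iff_of_pos (q := k) h5).mp h.symm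
      exact Or.inr (by omega)

theorem coaValid_get (answers : List Int) (c : Int) (h : coaValid answers c) :
    ∃ a, PySem.List.pyGet? answers c = some a ∧ a ≠ 0 := by
  obtain ⟨h0, hl, hnz⟩ := h
  have := PySem.List.pyGet?_eq_some_getElem (xs := answers) (i := c) h0 (by exact_mod_cast hl)
  exact ⟨answers[c.toNat], this, by rw [this] at hnz; simpa using hnz⟩

-- the loop reaches the first "productive" candidate c and returns its answer,
-- provided every earlier guard hit is an in-range zero
theorem coaLoop_reach (answers : List Int) (num index : Int) :
    ∀ (f : Nat) (i c : Int), i ≤ c → c - i < (f : Int) →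
    coaCond num index c = true → coaValid answers c →
    (∀ k, i ≤ k → k < c → coaCond num index k = true → PySem.List.pyGet? answers k = some 0) →
    coaLoop answers num index f i = some ((PySem.List.pyGet? answers c).getD 0) := by
  intro f
  induction f with
  | zero => intro i c h1 h2 _ _ _; omega
  | succ f ih =>
    intro i c h1 h2 hc hv hskip
    rcases eq_or_lt_of_le h1 with rfl | hlt
    · obtain ⟨a, ha, hnz⟩ := coaValid_get answers i hv
      simp [coaLoop, hc, ha, hnz]
    · have step : coaLoop answers num index (f + 1) i = coaLoop answers num index f (i + 1) := by
        by_cases h : coaCond num index i = true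
        · have h0 := hskip i le_rfl hlt h
          simp [coaLoop, h, h0]
        · simp [coaLoop, h]
      rw [step]
      exact ih (i + 1) c (by omega) (by omega) hc hv
        (fun k hk1 hk2 hk3 => hskip k (by omega) hk2 hk3)

-- B returns the answer at the smallest valid candidate
theorem alt_eq (answers : List Int) (num index : Int)
    (h : Pre_create_other_answer answers num index) :
    ∃ c, coaValid answers c ∧ (c = index ∨ c = PySem.Int.floordiv (index - num) 5) ∧
      (∀ k, (k = index ∨ k = PySem.Int.floordiv (index - num) 5) → coaValid answers k → c ≤ k) ∧
      create_other_answer_alt answers num index = ((PySem.List.pyGet? answers c).getD 0, index + 1) := by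
  set j := PySem.Int.floordiv (index - num) 5 with hj
  have hpred : ∀ c, (decide (0 ≤ c) && decide (c < (answers.length : Int)) &&
      ((PySem.List.pyGet? answers c).getD 0 != 0)) = true ↔ coaValid answers c := by
    intro c; unfold coaValid; simp; tauto
  by_cases hi : coaValid answers index <;> by_cases hjv : coaValid answers j
  · refine ⟨min index j, ?_, ?_, ?_, ?_⟩
    · rcases le_total index j with hle | hle
      · simpa [min_eq_left hle] using hi
      · simpa [min_eq_right hle] using hjv
    · rcases le_total index j with hle | hle
      · simp [min_eq_left hle]
      · simp [min_eq_right hle]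
    · rintro k (rfl | rfl) _
      · exact min_le_left _ _
      · exact min_le_right _ _
    · unfold create_other_answer_alt
      rw [← hj]
      have h1 := (hpred index).mpr hi
      have h2 := (hpred j).mpr hjv
      simp [List.filter, h1, h2, PySem.List.min?_id_cons, List.foldl]
  · refine ⟨index, hi, Or.inl rfl, ?_, ?_⟩
    · rintro k (rfl | rfl) hk
      · exact le_rfl
      · exact absurd hk hjv
    · unfold create_other_answer_alt
      rw [← hj]
      have h1 : (decide (0 ≤ index) && decide (index < (answers.length : Int)) &&
          ((PySem.List.pyGet? answers index).getD 0 != 0)) = true := (hpred index).mpr hi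
      have h2 : ¬ ((decide (0 ≤ j) && decide (j < (answers.length : Int)) &&
          ((PySem.List.pyGet? answers j).getD 0 != 0)) = true) := fun h => hjv ((hpred j).mp h)
      simp [List.filter, h1, h2, PySem.List.min?_id_cons]
  · refine ⟨j, hjv, Or.inr rfl, ?_, ?_⟩
    · rintro k (rfl | rfl) hk
      · exact absurd hk hi
      · exact le_rfl
    · unfold create_other_answer_alt
      rw [← hj]
      have h1 : ¬ ((decide (0 ≤ index) && decide (index < (answers.length : Int)) &&
          ((PySem.List.pyGet? answers index).getD 0 != 0)) = true) := fun h => hi ((hpred index).mp h)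
      have h2 : (decide (0 ≤ j) && decide (j < (answers.length : Int)) &&
          ((PySem.List.pyGet? answers j).getD 0 != 0)) = true := (hpred j).mpr hjv
      simp [List.filter, h1, h2, PySem.List.min?_id_cons]
  · exact absurd h (by unfold Pre_create_other_answer; rw [← hj]; tauto)

-- ===== VERDICT (by name: the statement is the Claim_ definition above) =====
theorem create_other_answer_spec : Claim_equal_create_other_answer := by
  intro answers num index _ hpre
  unfold Spec_create_other_answer
  obtain ⟨c, hv, hcand, hmin, halt⟩ := alt_eq answers num index hpre
  rw [halt]
  set j := PySem.Int.floordiv (index - num) 5 with hj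
  have hc0 : 0 ≤ c := hv.1
  have hcmax : c ≤ max index j := by
    rcases hcand with rfl | rfl
    · exact le_max_left _ _
    · exact le_max_right _ _
  have hloop : coaLoop answers num index ((max index j + 2).toNat) 0 =
      some ((PySem.List.pyGet? answers c).getD 0) := by
    apply coaLoop_reach answers num index _ 0 c hc0 (by omega)
      ((coaCond_iff num index c).mpr (by rw [← hj]; exact hcand)) hv
    intro k hk0 hkc hkcond
    have hkcand := (coaCond_iff num index k).mp hkcond
    rw [← hj] at hkcand
    have hklen : k < (answers.length : Int) := lt_trans hkc (lt_of_lt_of_le hv.2.1 le_rfl)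
    have hkz : (PySem.List.pyGet? answers k).getD 0 = 0 := by
      by_contra hnz
      have : coaValid answers k := ⟨hk0, hklen, hnz⟩
      exact absurd (hmin k hkcand this) (by omega)
    have := PySem.List.pyGet?_eq_some_getElem (xs := answers) (i := k) hk0 (by exact_mod_cast hklen)
    rw [this] at hkz ⊢
    simp at hkz
    simp [hkz]
  unfold create_other_answer
  rw [← hj]
  simp [hloop]
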